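-- pv_equiv track=rewrite | github.com/missingdays/nerdy.python | challenges/contests/code_forces/round336/a.py | find_biggest
-- ===== SOURCE A (Python) =====
-- def find_biggest(n, ps, s):
--     n -= 1
--     i = 0
--     m = 0
--
--     while n >= 0 and ps[n][0] == s:
--         i = n
--         m = max(m, ps[n][1])
--         n -= 1
--
--     return m, i
-- ===== SOURCE B (Python) =====
-- def find_biggest(n, ps, s):
--     # locate the start of the matching trailing suffix, then reduce over it
--     start = n
--     while start > 0 and ps[start - 1][0] == s:
--         start -= 1
--     vals = [p[1] for p in ps[start:n]]
--     return max([0] + vals), (start if start < n else 0)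
-- ===== Notes on version B (the rewrite author's own statement) =====
-- stated objective: alternative
-- what changed: Replaces A's single fused accumulating loop (tracking i and m together) with a two-phase decomposition: a backward scan that only finds the suffix boundary, then a slice/comprehension pass max([0]+vals) and an arithmetic choice of the index.
import Mathlib
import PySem

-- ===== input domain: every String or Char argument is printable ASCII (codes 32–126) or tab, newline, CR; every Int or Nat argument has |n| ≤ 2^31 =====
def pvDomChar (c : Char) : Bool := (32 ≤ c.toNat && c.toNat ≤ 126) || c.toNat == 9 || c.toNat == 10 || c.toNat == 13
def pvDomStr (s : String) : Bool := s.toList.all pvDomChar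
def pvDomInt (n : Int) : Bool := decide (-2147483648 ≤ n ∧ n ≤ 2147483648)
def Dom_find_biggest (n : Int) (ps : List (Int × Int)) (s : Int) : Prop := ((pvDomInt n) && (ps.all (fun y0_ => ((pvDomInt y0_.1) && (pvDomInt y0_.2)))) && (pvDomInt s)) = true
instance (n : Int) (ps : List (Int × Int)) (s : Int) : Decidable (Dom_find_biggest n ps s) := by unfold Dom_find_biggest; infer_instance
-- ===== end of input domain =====

-- B separates locating the matching trailing suffix from reducing over it (alternative decomposition, same cost).

-- ===== PORT A =====
-- A's while loop: state (n, i, m); the 'none' branch is where Python raises IndexError (outside Pre_).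
def find_biggest_loopA (ps : List (Int × Int)) (s : Int) (n i m : Int) : Int × Int :=
  if h : 0 ≤ n then
    match PySem.List.pyGet? ps n with
    | some p =>
      if p.1 = s then find_biggest_loopA ps s (n - 1) n (max m p.2) else (m, i)
    | none => (m, i)
  else (m, i)
termination_by (n + 1).toNat
decreasing_by omega

def find_biggest (n : Int) (ps : List (Int × Int)) (s : Int) : Int × Int :=
  find_biggest_loopA ps s (n - 1) 0 0

-- ===== PORT B =====
-- B's first pass: decrement start while ps[start-1][0] == s; the 'none' branch is where Python raises (outside Pre_).
def find_biggest_start (ps : List (Int × Int)) (s : Int) (start : Int) : Int :=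
  if h : 0 < start then
    match PySem.List.pyGet? ps (start - 1) with
    | some p => if p.1 = s then find_biggest_start ps s (start - 1) else start
    | none => start
  else start
termination_by start.toNat
decreasing_by omega

-- max([0] + vals) on Ints is the fold of max over vals starting from 0
def find_biggest_alt (n : Int) (ps : List (Int × Int)) (s : Int) : Int × Int :=
  let start := find_biggest_start ps s n
  let vals := (PySem.List.slice ps (some start) (some n)).map Prod.snd
  (vals.foldl max 0, if start < n then start else 0)

-- ===== PRECONDITION & SPEC =====
-- Pre_ excludes exactly the inputs where Python A raises IndexError: n exceeding len(ps).
def Pre_find_biggest (n : Int) (ps : List (Int × Int)) (s : Int) : Prop := n ≤ (ps.length : Int)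
instance (n : Int) (ps : List (Int × Int)) (s : Int) : Decidable (Pre_find_biggest n ps s) := by unfold Pre_find_biggest; infer_instance
def pvWitness_find_biggest : Int × (List (Int × Int)) × Int := (3, [(1, 4), (2, -1), (2, 7)], 2)

def Spec_find_biggest (n : Int) (ps : List (Int × Int)) (s : Int) (out : Int × Int) : Prop := out = find_biggest_alt n ps s
instance (n : Int) (ps : List (Int × Int)) (s : Int) (out : Int × Int) : Decidable (Spec_find_biggest n ps s out) := by unfold Spec_find_biggest; infer_instance

-- ===== CLAIM (what is proved, stated in full; the proofs are below) =====
def Claim_equal_find_biggest : Prop := ∀ (n : Int) (ps : List (Int × Int)) (s : Int), Dom_find_biggest n ps s → Pre_find_biggest n ps s → Spec_find_biggest n ps s (find_biggest n ps s)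

-- ===== LEMMAS AND PROOFS =====

theorem fb_start_le (ps : List (Int × Int)) (s : Int) (start : Int) :
    find_biggest_start ps s start ≤ start := by
  induction start using find_biggest_start.induct ps s with
  | case1 start hpos p hget hmatch ih =>
    rw [find_biggest_start, dif_pos hpos, hget]; dsimp only; rw [if_pos hmatch]
    omega
  | case2 start hpos p hget hmatch =>
    rw [find_biggest_start, dif_pos hpos, hget]; dsimp only; rw [if_neg hmatch]
  | case3 start hpos hget =>
    rw [find_biggest_start, dif_pos hpos, hget]
  | case4 start hpos =>
    rw [find_biggest_start, dif_neg hpos]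

theorem fb_start_nonneg (ps : List (Int × Int)) (s : Int) (start : Int)
    (h : 0 ≤ start) : 0 ≤ find_biggest_start ps s start := by
  induction start using find_biggest_start.induct ps s with
  | case1 start hpos p hget hmatch ih =>
    rw [find_biggest_start, dif_pos hpos, hget]; dsimp only; rw [if_pos hmatch]
    exact ih (by omega)
  | case2 start hpos p hget hmatch =>
    rw [find_biggest_start, dif_pos hpos, hget]; dsimp only; rw [if_neg hmatch]; exact h
  | case3 start hpos hget =>
    rw [find_biggest_start, dif_pos hpos, hget]; exact h
  | case4 start hpos =>
    rw [find_biggest_start, dif_neg hpos]; exact h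

theorem foldl_max_swap (l : List Int) (a b : Int) :
    List.foldl max (max a b) l = max (List.foldl max a l) b := by
  induction l generalizing a with
  | nil => rfl
  | cons x t ih =>
    simp only [List.foldl]
    rw [show max (max a b) x = max (max a x) b by rw [max_right_comm], ih]

theorem fb_slice_empty (ps : List (Int × Int)) (a : Int) :
    PySem.List.slice ps (some a) (some a) = [] := by
  apply List.eq_nil_of_length_eq_zero
  rw [PySem.List.length_slice]
  omega

theorem fb_key (ps : List (Int × Int)) (s : Int) :
    ∀ (k : Nat), k ≤ ps.length → ∀ (i m : Int),
      find_biggest_loopA ps s ((k : Int) - 1) i m =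
        (((PySem.List.slice ps (some (find_biggest_start ps s (k : Int))) (some (k : Int))).map Prod.snd).foldl max m,
         if find_biggest_start ps s (k : Int) < (k : Int) then find_biggest_start ps s (k : Int) else i) := by
  intro k
  induction k with
  | zero =>
    intro _ i m
    simp only [Nat.cast_zero]
    have h0 : find_biggest_start ps s (0 : Int) = 0 := by
      rw [find_biggest_start, dif_neg (by omega)]
    rw [find_biggest_loopA.eq_def, dif_neg (by omega : ¬ (0:Int) ≤ 0 - 1)]
    rw [h0, fb_slice_empty]
    simp
  | succ k ih =>
    intro hlen i m
    have hk : k < ps.length := by omega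
    have hget : PySem.List.pyGet? ps ((k : Int)) = some ps[k] := by
      rw [PySem.List.pyGet?_natCast, List.getElem?_eq_getElem hk]
    have hstart_unfold : find_biggest_start ps s ((k : Int) + 1) =
        (if ps[k].1 = s then find_biggest_start ps s (k : Int) else (k : Int) + 1) := by
      rw [find_biggest_start, dif_pos (by omega : (0:Int) < (k : Int) + 1)]
      rw [show ((k : Int) + 1) - 1 = (k : Int) by ring, hget]
    rw [show (((k + 1 : Nat) : Int) - 1) = (k : Int) by push_cast; ring]
    rw [find_biggest_loopA.eq_def, dif_pos (by omega : (0:Int) ≤ (k:Int)), hget]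
    dsimp only
    by_cases hm : ps[k].1 = s
    · -- matching element: the loop recurses and start passes k
      rw [if_pos hm]
      rw [ih (by omega) (k : Int) (max m ps[k].2)]
      have hst_eq : find_biggest_start ps s (((k+1 : Nat)) : Int) = find_biggest_start ps s (k : Int) := by
        push_cast; rw [hstart_unfold, if_pos hm]
      set st := find_biggest_start ps s (k : Int) with hst
      have hst_le : st ≤ (k : Int) := fb_start_le ps s (k : Int)
      have hst_nn : 0 ≤ st := fb_start_nonneg ps s (k : Int) (by omega)
      obtain ⟨t, ht⟩ : ∃ t : Nat, st = (t : Int) := ⟨st.toNat, by omega⟩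
      have htk : t ≤ k := by omega
      have hslice : PySem.List.slice ps (some st) (some (((k+1 : Nat)) : Int)) =
          PySem.List.slice ps (some st) (some (k : Int)) ++ [ps[k]] := by
        rw [ht, PySem.List.slice_natCast, PySem.List.slice_natCast]
        rw [show k + 1 - t = (k - t) + 1 by omega, List.take_add_one]
        congr 1
        have h4 : (ps.drop t)[k - t]? = some ps[k] := by
          rw [List.getElem?_drop, show t + (k - t) = k by omega, List.getElem?_eq_getElem hk]
        simp [h4]
      rw [hst_eq, hslice]
      simp only [List.map_append, List.foldl_append, List.map_cons, List.map_nil, List.foldl]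
      simp only [Prod.mk.injEq]
      constructor
      · exact foldl_max_swap _ m _
      · have hlt1 : st < ((k+1 : Nat) : Int) := by push_cast; omega
        rw [if_pos hlt1]
        by_cases hlt : st < (k : Int)
        · rw [if_pos hlt]
        · rw [if_neg hlt]; omega
    · -- non-matching element: the loop stops and start stays at k+1
      rw [if_neg hm]
      have hst_eq : find_biggest_start ps s (((k+1 : Nat)) : Int) = ((k+1 : Nat) : Int) := by
        push_cast; rw [hstart_unfold, if_neg hm]
      rw [hst_eq, fb_slice_empty]
      simp

theorem fb_neg (ps : List (Int × Int)) (s : Int) (n : Int) (h : n ≤ 0) :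
    find_biggest n ps s = find_biggest_alt n ps s := by
  rw [find_biggest, find_biggest_loopA.eq_def, dif_neg (by omega : ¬ (0:Int) ≤ n - 1)]
  rw [find_biggest_alt]
  have hst : find_biggest_start ps s n = n := by
    rw [find_biggest_start, dif_neg (by omega : ¬ (0:Int) < n)]
  simp only [hst, fb_slice_empty]
  simp

-- ===== VERDICT (by name: the statement is the Claim_ definition above) =====
theorem find_biggest_spec : Claim_equal_find_biggest := by
  intro n ps s _ hpre
  unfold Spec_find_biggest
  by_cases hn : n ≤ 0
  · exact fb_neg ps s n hn
  · have hn' : n = ((n.toNat : Nat) : Int) := by omega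
    have hlen : n.toNat ≤ ps.length := by
      unfold Pre_find_biggest at hpre; omega
    rw [find_biggest, find_biggest_alt, hn', fb_key ps s n.toNat hlen 0 0]
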